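-- pv_equiv track=rewrite | github.com/vaibhav-jain-dev/learning-algo | problems/200-must-solve/dynamic-programming/05-max-sum-increasing/python_code.py | all_max_sum_increasing_subsequences
-- ===== SOURCE A (Python) =====
-- from typing import List, Tuple
--
-- def all_max_sum_increasing_subsequences(array: List[int]) -> List[List[int]]:
--     """
--     Find all subsequences that achieve the maximum sum.
--
--     Args:
--         array: List of integers
--
--     Returns:
--         List of all optimal subsequences (as index lists)
--     """
--     if not array:
--         return [[]]
--
--     n = len(array)
--     dp = array[:]
--     prev_lists = [[] for _ in range(n)]
--
--     for i in range(1, n):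
--         for j in range(i):
--             if array[j] < array[i]:
--                 if dp[j] + array[i] > dp[i]:
--                     dp[i] = dp[j] + array[i]
--                     prev_lists[i] = [j]
--                 elif dp[j] + array[i] == dp[i]:
--                     prev_lists[i].append(j)
--
--     max_sum = max(dp)
--     max_indices = [i for i in range(n) if dp[i] == max_sum]
--
--     def backtrack(idx: int) -> List[List[int]]:
--         if not prev_lists[idx]:
--             return [[idx]]
--
--         results = []
--         for prev_idx in prev_lists[idx]:
--             for path in backtrack(prev_idx):
--                 results.append(path + [idx])
--         return results
--
--     all_subsequences = []
--     for idx in max_indices: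
--         all_subsequences.extend(backtrack(idx))
--
--     return all_subsequences
-- ===== SOURCE B (Python) =====
-- from typing import List
--
-- def all_max_sum_increasing_subsequences(array: List[int]) -> List[List[int]]:
--     """
--     Find all subsequences that achieve the maximum sum.
--
--     Returns the list of all optimal subsequences (as index lists).
--
--     Instead of storing predecessor edges and backtracking recursively, this
--     version materialises the optimal index-paths ending at each position
--     during a single forward DP pass.  epaths[i] holds the extended optimal
--     paths ending at i ([] meaning the bare singleton path [i]).
--     """
--     if not array:
--         return [[]]
--
--     n = len(array)
--     dp = array[:]
--     epaths: List[List[List[int]]] = [[] for _ in range(n)]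
--
--     def full(j: int) -> List[List[int]]:
--         return epaths[j] if epaths[j] else [[j]]
--
--     for i in range(1, n):
--         for j in range(i):
--             if array[j] < array[i]:
--                 cand = dp[j] + array[i]
--                 if cand > dp[i]:
--                     dp[i] = cand
--                     epaths[i] = [p + [i] for p in full(j)]
--                 elif cand == dp[i]:
--                     epaths[i] = epaths[i] + [p + [i] for p in full(j)]
--
--     best = max(dp)
--     result: List[List[int]] = []
--     for i in range(n):
--         if dp[i] == best:
--             result.extend(full(i))
--     return result
-- ===== Notes on version B (the rewrite author's own statement) =====
-- stated objective: alternative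
-- what changed: B removes the predecessor-edge lists and the recursive backtracking pass entirely: it materialises the optimal index-paths ending at each position during the single forward DP pass (epaths[i], with [] meaning the bare singleton path) and concatenates them for the maximal positions, so the result enumeration is memoised instead of recomputed by recursion.
import Mathlib
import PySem

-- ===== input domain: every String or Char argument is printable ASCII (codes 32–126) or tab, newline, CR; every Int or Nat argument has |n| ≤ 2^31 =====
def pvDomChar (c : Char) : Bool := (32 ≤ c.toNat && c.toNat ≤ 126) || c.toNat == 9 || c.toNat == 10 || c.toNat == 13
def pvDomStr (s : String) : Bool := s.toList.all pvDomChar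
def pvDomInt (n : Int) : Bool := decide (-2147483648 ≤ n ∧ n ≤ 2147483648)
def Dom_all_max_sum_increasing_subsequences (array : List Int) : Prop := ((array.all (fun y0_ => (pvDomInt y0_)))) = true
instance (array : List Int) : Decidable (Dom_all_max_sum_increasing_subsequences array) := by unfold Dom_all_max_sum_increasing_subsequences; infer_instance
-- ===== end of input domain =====

-- B replaces A's predecessor-edge lists + recursive backtracking by materialising the
-- optimal index-paths during the forward DP pass (objective: alternative decomposition).


-- ===== PORT A =====
-- one inner-loop step of A: j-th comparison for outer index i, state (dp, prev_lists)
def pvStepA (a : List Int) (i : Nat) (st : List Int × List (List Nat)) (j : Nat) :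
    List Int × List (List Nat) :=
  if a.getD j 0 < a.getD i 0 then
    if st.1.getD j 0 + a.getD i 0 > st.1.getD i 0 then
      (st.1.set i (st.1.getD j 0 + a.getD i 0), st.2.set i [j])
    else if st.1.getD j 0 + a.getD i 0 = st.1.getD i 0 then
      (st.1, st.2.set i (st.2.getD i [] ++ [j]))
    else st
  else st

-- Python max(dp) on a nonempty list
def pvMax (dp : List Int) : Int :=
  match dp with
  | [] => 0
  | x :: xs => xs.foldl (fun m v => if v > m then v else m) x

-- A's recursive backtrack; fuel bounds the recursion depth (prev_lists entries always
-- point strictly downwards, so fuel = n is never exhausted on A's actual states)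
def pvBt (prev : List (List Nat)) : Nat → Nat → List (List Int)
  | 0, idx => [[(idx : Int)]]
  | fuel + 1, idx =>
    if (prev.getD idx []).isEmpty then [[(idx : Int)]]
    else (prev.getD idx []).flatMap (fun j => (pvBt prev fuel j).map (· ++ [(idx : Int)]))

def all_max_sum_increasing_subsequences (array : List Int) : List (List Int) :=
  if array.isEmpty then [[]]
  else
    let n := array.length
    let st := (List.range' 1 (n - 1)).foldl
      (fun st i => (List.range i).foldl (pvStepA array i) st)
      (array, List.replicate n ([] : List Nat))
    let maxSum := pvMax st.1
    let maxIndices := (List.range n).filter (fun i => st.1.getD i 0 = maxSum)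
    maxIndices.foldl (fun acc idx => acc ++ pvBt st.2 n idx) []

-- ===== PORT B =====
-- full(j): the optimal paths ending at j ([] recorded means the bare singleton [j])
def pvFull (ep : List (List (List Int))) (j : Nat) : List (List Int) :=
  if (ep.getD j []).isEmpty then [[(j : Int)]] else ep.getD j []

-- one inner-loop step of B: state (dp, epaths)
def pvStepB (a : List Int) (i : Nat) (st : List Int × List (List (List Int))) (j : Nat) :
    List Int × List (List (List Int)) :=
  if a.getD j 0 < a.getD i 0 then
    if st.1.getD j 0 + a.getD i 0 > st.1.getD i 0 then
      (st.1.set i (st.1.getD j 0 + a.getD i 0),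
       st.2.set i ((pvFull st.2 j).map (· ++ [(i : Int)])))
    else if st.1.getD j 0 + a.getD i 0 = st.1.getD i 0 then
      (st.1, st.2.set i (st.2.getD i [] ++ (pvFull st.2 j).map (· ++ [(i : Int)])))
    else st
  else st

def all_max_sum_increasing_subsequences_alt (array : List Int) : List (List Int) :=
  if array.isEmpty then [[]]
  else
    let n := array.length
    let st := (List.range' 1 (n - 1)).foldl
      (fun st i => (List.range i).foldl (pvStepB array i) st)
      (array, List.replicate n ([] : List (List Int)))
    let best := pvMax st.1
    (List.range n).foldl (fun acc i => if st.1.getD i 0 = best then acc ++ pvFull st.2 i else acc) []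

-- ===== PRECONDITION & SPEC =====
def Spec_all_max_sum_increasing_subsequences (array : List Int) (out : List (List Int)) : Prop := out = all_max_sum_increasing_subsequences_alt array
instance (array : List Int) (out : List (List Int)) : Decidable (Spec_all_max_sum_increasing_subsequences array out) := by unfold Spec_all_max_sum_increasing_subsequences; infer_instance

-- ===== CLAIM (what is proved, stated in full; the proofs are below) =====
def Claim_equal_all_max_sum_increasing_subsequences : Prop := ∀ (array : List Int), Dom_all_max_sum_increasing_subsequences array → Spec_all_max_sum_increasing_subsequences array (all_max_sum_increasing_subsequences array)

-- ===== LEMMAS AND PROOFS =====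

-- prev entries point strictly downwards
def pvBnd (prev : List (List Nat)) : Prop :=
  ∀ k x, x ∈ prev.getD k [] → x < k

-- entries at or above b are still empty
def pvHi (prev : List (List Nat)) (b : Nat) : Prop :=
  ∀ k, b ≤ k → prev.getD k [] = []

-- the B-state materialises exactly A's backtrack results
def pvRel (n : Nat) (prev : List (List Nat)) (ep : List (List (List Int))) : Prop :=
  ∀ k, ep.getD k [] =
    (prev.getD k []).flatMap (fun j => (pvBt prev n j).map (· ++ [(k : Int)]))

def pvInv (n b : Nat)
    (A : List Int × List (List Nat)) (B : List Int × List (List (List Int))) : Prop :=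
  A.1 = B.1 ∧ A.2.length = n ∧ B.2.length = n ∧ pvBnd A.2 ∧ pvHi A.2 b ∧ pvRel n A.2 B.2

theorem pvGetD_set_self {α : Type} (l : List α) (i : Nat) (v d : α) (h : i < l.length) :
    (l.set i v).getD i d = v := by
  simp [List.getD_eq_getElem?_getD, h]

theorem pvGetD_set_ne {α : Type} (l : List α) (i k : Nat) (v d : α) (h : k ≠ i) :
    (l.set i v).getD k d = l.getD k d := by
  simp [List.getD_eq_getElem?_getD, List.getElem?_set_ne (Ne.symm h)]

theorem pvFlatMap_congr {α β : Type} (l : List α) (f g : α → List β)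
    (h : ∀ x ∈ l, f x = g x) : l.flatMap f = l.flatMap g := by
  induction l with
  | nil => rfl
  | cons a t ih =>
    simp only [List.flatMap_cons]
    rw [h a (by simp), ih (fun x hx => h x (by simp [hx]))]

theorem pvGetD_replicate {α : Type} (n k : Nat) (x d : α) :
    (List.replicate n x).getD k d = if k < n then x else d := by
  simp only [List.getD_eq_getElem?_getD, List.getElem?_replicate]
  split <;> rfl

theorem pvBt_ne_nil (prev : List (List Nat)) (fuel idx : Nat) : pvBt prev fuel idx ≠ [] := by
  induction fuel generalizing idx with
  | zero => simp [pvBt]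
  | succ m ih =>
    rcases h : prev.getD idx [] with _ | ⟨x, xs⟩
    · rw [List.getD_eq_getElem?_getD] at h
      simp [pvBt, List.getD_eq_getElem?_getD, h]
    · simp only [pvBt, h, List.isEmpty_cons, Bool.false_eq_true, if_false, List.flatMap_cons,
        ne_eq, List.append_eq_nil_iff, List.map_eq_nil_iff]
      intro ⟨h1, _⟩
      exact ih x h1

theorem pvBt_fuel_indep (prev : List (List Nat)) (h : pvBnd prev)
    (f1 : Nat) : ∀ f2 idx, idx < f1 → idx < f2 → pvBt prev f1 idx = pvBt prev f2 idx := by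
  induction f1 with
  | zero => intro f2 idx h1 _; omega
  | succ m ih =>
    intro f2 idx h1 h2
    rcases f2 with _ | m'
    · omega
    simp only [pvBt]
    split
    · rfl
    · apply pvFlatMap_congr
      intro j hj
      have hji : j < idx := h idx j hj
      rw [ih m' j (by omega) (by omega)]

theorem pvBt_set_high (prev : List (List Nat)) (h : pvBnd prev) (i : Nat) (v : List Nat)
    (fuel : Nat) : ∀ idx, idx < i → pvBt (prev.set i v) fuel idx = pvBt prev fuel idx := by
  induction fuel with
  | zero => intro idx _; rfl
  | succ m ih =>
    intro idx hlt
    simp only [pvBt, pvGetD_set_ne prev i idx v [] (by omega)]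
    split
    · rfl
    · apply pvFlatMap_congr
      intro j hj
      rw [ih j (by have := h idx j hj; omega)]

theorem pvFull_eq_bt (n : Nat) (prev : List (List Nat)) (ep : List (List (List Int)))
    (hb : pvBnd prev) (hr : pvRel n prev ep) (k : Nat) (hk : k < n) :
    pvFull ep k = pvBt prev n k := by
  rcases n with _ | m
  · omega
  have hb2 : pvBt prev (m + 1) k =
      if (prev.getD k []).isEmpty then [[(k : Int)]]
      else (prev.getD k []).flatMap (fun j => (pvBt prev m j).map (· ++ [(k : Int)])) := rfl
  rcases h : prev.getD k [] with _ | ⟨x, xs⟩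
  · have h1 : ep.getD k [] = [] := by rw [hr k, h]; rfl
    rw [List.getD_eq_getElem?_getD] at h h1
    simp [pvFull, List.getD_eq_getElem?_getD, h1, hb2, h]
  · have hflat : ep.getD k [] =
        List.flatMap (fun j => (pvBt prev (m + 1) j).map (· ++ [(k : Int)])) (x :: xs) := by
      rw [hr k, h]
    have hne : ep.getD k [] ≠ [] := by
      rw [hflat]
      simp only [List.flatMap_cons, ne_eq, List.append_eq_nil_iff, List.map_eq_nil_iff]
      intro ⟨h1, _⟩
      exact pvBt_ne_nil prev (m + 1) x h1
    have hfull : pvFull ep k = ep.getD k [] := by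
      simp only [pvFull]
      rw [if_neg (by simpa using hne)]
    rw [hfull, hflat, hb2, h]
    simp only [List.isEmpty_cons, Bool.false_eq_true, if_false]
    apply pvFlatMap_congr
    intro j hj
    have hjk : j < k := hb k j (h ▸ hj)
    rw [pvBt_fuel_indep prev hb (m + 1) m j (by omega) (by omega)]

theorem pvStep_inv (a : List Int) (n : Nat) (i j : Nat) (hj : j < i) (hi : i < n)
    (A : List Int × List (List Nat)) (B : List Int × List (List (List Int)))
    (h : pvInv n (i + 1) A B) :
    pvInv n (i + 1) (pvStepA a i A j) (pvStepB a i B j) := by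
  obtain ⟨hdp, hlA, hlB, hbnd, hhi, hrel⟩ := h
  have keyRel : ∀ (newPrevI : List Nat) (newEpI : List (List Int)),
      (∀ x ∈ newPrevI, x < i) →
      newEpI = newPrevI.flatMap (fun j' => (pvBt A.2 n j').map (· ++ [(i : Int)])) →
      pvRel n (A.2.set i newPrevI) (B.2.set i newEpI) := by
    intro np ne hnp hne k
    by_cases hk : k = i
    · subst hk
      rw [pvGetD_set_self A.2 k np [] (by omega), pvGetD_set_self B.2 k ne [] (by omega), hne]
      apply pvFlatMap_congr
      intro x hx
      rw [pvBt_set_high A.2 hbnd k np n x (hnp x hx)]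
    · rw [pvGetD_set_ne A.2 i k np [] hk, pvGetD_set_ne B.2 i k ne [] hk, hrel k]
      by_cases hki : k < i
      · apply pvFlatMap_congr
        intro x hx
        have : x < k := hbnd k x hx
        rw [pvBt_set_high A.2 hbnd i np n x (by omega)]
      · rw [hhi k (by omega)]
        simp
  have keyBnd : ∀ (newPrevI : List Nat), (∀ x ∈ newPrevI, x < i) →
      pvBnd (A.2.set i newPrevI) := by
    intro np hnp k x hx
    by_cases hk : k = i
    · subst hk; rw [pvGetD_set_self A.2 k np [] (by omega)] at hx; exact hnp x hx
    · rw [pvGetD_set_ne A.2 i k np [] hk] at hx; exact hbnd k x hx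
  have keyHi : ∀ (newPrevI : List Nat), pvHi (A.2.set i newPrevI) (i + 1) := by
    intro np k hk
    rw [pvGetD_set_ne A.2 i k np [] (by omega)]
    exact hhi k hk
  simp only [pvStepA, pvStepB, ← hdp]
  split
  · split
    · refine ⟨rfl, by simp [hlA], by simp [hlB], keyBnd [j] (by simpa using hj), keyHi [j], ?_⟩
      apply keyRel [j] _ (by simpa using hj)
      rw [pvFull_eq_bt n A.2 B.2 hbnd hrel j (by omega)]
      simp
    · split
      · refine ⟨rfl, by simp [hlA], by simp [hlB],
          keyBnd _ (by intro x hx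
                       rcases List.mem_append.mp hx with hx | hx
                       · have := hbnd i x hx; omega
                       · simp at hx; omega),
          keyHi _, ?_⟩
        apply keyRel _ _ (by intro x hx
                             rcases List.mem_append.mp hx with hx | hx
                             · have := hbnd i x hx; omega
                             · simp at hx; omega)
        rw [List.flatMap_append, ← hrel i, pvFull_eq_bt n A.2 B.2 hbnd hrel j (by omega)]
        simp
      · exact ⟨hdp, hlA, hlB, hbnd, hhi, hrel⟩
  · exact ⟨hdp, hlA, hlB, hbnd, hhi, hrel⟩

theorem pvFold_inv (a : List Int) (n : Nat) (i : Nat) (hi : i < n) (L : List Nat)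
    (hL : ∀ j ∈ L, j < i) :
    ∀ (A : List Int × List (List Nat)) (B : List Int × List (List (List Int))),
    pvInv n (i + 1) A B →
    pvInv n (i + 1) (L.foldl (pvStepA a i) A) (L.foldl (pvStepB a i) B) := by
  induction L with
  | nil => intro A B h; exact h
  | cons x t ih =>
    intro A B h
    simp only [List.foldl_cons]
    exact ih (fun j hj => hL j (by simp [hj])) _ _
      (pvStep_inv a n i x (hL x (by simp)) hi A B h)

theorem pvHi_mono (prev : List (List Nat)) (b b' : Nat) (h : b ≤ b') (hh : pvHi prev b) :
    pvHi prev b' := fun k hk => hh k (by omega)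

theorem pvOuter_inv (a : List Int) (n : Nat) (len s : Nat) (hsn : s + len ≤ n)
    (A : List Int × List (List Nat)) (B : List Int × List (List (List Int)))
    (h : pvInv n s A B) :
    pvInv n (s + len)
      ((List.range' s len).foldl (fun st i => (List.range i).foldl (pvStepA a i) st) A)
      ((List.range' s len).foldl (fun st i => (List.range i).foldl (pvStepB a i) st) B) := by
  induction len generalizing s A B with
  | zero => exact h
  | succ m ih =>
    simp only [List.range'_succ, List.foldl_cons]
    have h1 : pvInv n (s + 1) A B := by
      obtain ⟨h1, h2, h3, h4, h5, h6⟩ := h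
      exact ⟨h1, h2, h3, h4, pvHi_mono A.2 s (s+1) (by omega) h5, h6⟩
    have hstep := pvFold_inv a n s (by omega) (List.range s) (by simp) A B h1
    have := ih (s + 1) (by omega) _ _ hstep
    have heq : s + 1 + m = s + (m + 1) := by omega
    rw [heq] at this
    exact this

theorem pvFoldFilter {α : Type} (p : α → Bool) (f g : α → List (List Int)) (L : List α)
    (hfg : ∀ x ∈ L, f x = g x) :
    ∀ acc, ((L.filter p).foldl (fun acc x => acc ++ f x) acc) =
      L.foldl (fun acc x => if p x then acc ++ g x else acc) acc := by
  induction L with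
  | nil => intro acc; rfl
  | cons x t ih =>
    intro acc
    simp only [List.filter_cons, List.foldl_cons]
    by_cases hp : p x
    · simp only [hp, if_true, List.foldl_cons]
      rw [hfg x (by simp)]
      exact ih (fun y hy => hfg y (by simp [hy])) _
    · simp only [hp, if_false, Bool.false_eq_true]
      exact ih (fun y hy => hfg y (by simp [hy])) _

-- ===== VERDICT (by name: the statement is the Claim_ definition above) =====
theorem all_max_sum_increasing_subsequences_spec : Claim_equal_all_max_sum_increasing_subsequences := by
  intro array _
  unfold Spec_all_max_sum_increasing_subsequences
  unfold all_max_sum_increasing_subsequences all_max_sum_increasing_subsequences_alt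
  by_cases he : array.isEmpty
  · simp [he]
  simp only [he, if_false, Bool.false_eq_true]
  have hn1 : 1 ≤ array.length := by
    rcases array with _ | _
    · simp at he
    · simp
  have hinit : pvInv array.length 1
      (array, List.replicate array.length ([] : List Nat))
      (array, List.replicate array.length ([] : List (List Int))) := by
    refine ⟨rfl, by simp, by simp, ?_, ?_, ?_⟩
    · intro k x hx
      rw [pvGetD_replicate] at hx
      split at hx <;> simp at hx
    · intro k _
      rw [pvGetD_replicate]
      split <;> rfl
    · intro k
      rw [pvGetD_replicate, pvGetD_replicate]
      split <;> simp
  have hout := pvOuter_inv array array.length (array.length - 1) 1 (by omega) _ _ hinit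
  rw [show 1 + (array.length - 1) = array.length by omega] at hout
  obtain ⟨hdp, _, _, hbnd, _, hrel⟩ := hout
  rw [← hdp]
  rw [pvFoldFilter _ (pvBt _ array.length) (pvFull _) (List.range array.length)
    (by intro x hx
        rw [pvFull_eq_bt array.length _ _ hbnd hrel x (List.mem_range.mp hx)]) []]
  simp only [decide_eq_true_eq]
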